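-- pv_equiv track=rewrite | github.com/angwz/DomainRouter | script/domain_classification.py | sort_domain_items
-- ===== SOURCE A (Python) =====
-- def sort_domain_items(items):
--     plus_items = []
--     star_items = []
--     dot_items = []
--     plain_items = []
--
--     for item in items:
--         if item.startswith('+.'):
--             plus_items.append(item)
--         elif item.startswith('*.'):
--             star_items.append(item)
--         elif item.startswith('.'):
--             dot_items.append(item)
--         else:
--             plain_items.append(item)
--
--     def sort_by_parts(items):
--         return sorted(items, key=lambda x: (x.count('.'), x))
--
--     plus_items = sort_by_parts(plus_items)
--     star_items = sort_by_parts(star_items)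
--     dot_items = sort_by_parts(dot_items)
--     plain_items = sort_by_parts(plain_items)
--
--     return plus_items + star_items + dot_items + plain_items
-- ===== SOURCE B (Python) =====
-- def sort_domain_items(items):
--     def priority(x):
--         if x.startswith('+.'):
--             return 0
--         elif x.startswith('*.'):
--             return 1
--         elif x.startswith('.'):
--             return 2
--         else:
--             return 3
--     return sorted(items, key=lambda x: (priority(x), x.count('.'), x))
-- ===== Notes on version B (the rewrite author's own statement) =====
-- stated objective: simpler
-- what changed: B replaces A's partition-into-four-bucket-lists, four separate sorts and a concatenation by a single stable sort of the whole list under the combined key (branch priority, dot count, string); no bucket lists are maintained.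
import Mathlib
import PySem

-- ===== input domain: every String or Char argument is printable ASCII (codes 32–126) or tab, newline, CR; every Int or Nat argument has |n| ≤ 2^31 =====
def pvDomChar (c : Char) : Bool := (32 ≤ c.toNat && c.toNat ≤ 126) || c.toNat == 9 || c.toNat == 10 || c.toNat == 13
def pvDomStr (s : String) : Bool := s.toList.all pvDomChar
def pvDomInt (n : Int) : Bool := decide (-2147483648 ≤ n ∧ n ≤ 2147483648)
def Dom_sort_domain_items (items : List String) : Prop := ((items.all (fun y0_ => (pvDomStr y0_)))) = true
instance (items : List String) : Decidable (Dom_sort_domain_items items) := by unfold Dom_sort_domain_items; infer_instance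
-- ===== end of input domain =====

-- B replaces A's partition-into-four-buckets-then-sort-each-and-concatenate by ONE stable sort
-- of the whole list under the combined key (priority, dot count, string); same return value.

-- ===== PORT A =====
-- sort_by_parts(items) = sorted(items, key=lambda x: (x.count('.'), x))
def sort_by_parts (xs : List String) : List String :=
  PySem.List.sorted2 xs (fun x => PySem.Str.count x ".") (fun x => x)

def sort_domain_items (items : List String) : List String :=
  -- the for-loop filling the four bucket lists, as a fold over the same 4-tuple of lists
  (fun bs => sort_by_parts bs.1 ++ sort_by_parts bs.2.1 ++ sort_by_parts bs.2.2.1 ++ sort_by_parts bs.2.2.2)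
    (items.foldl
      (fun (st : List String × List String × List String × List String) item =>
        if PySem.Str.startswith item "+." then (st.1 ++ [item], st.2.1, st.2.2.1, st.2.2.2)
        else if PySem.Str.startswith item "*." then (st.1, st.2.1 ++ [item], st.2.2.1, st.2.2.2)
        else if PySem.Str.startswith item "." then (st.1, st.2.1, st.2.2.1 ++ [item], st.2.2.2)
        else (st.1, st.2.1, st.2.2.1, st.2.2.2 ++ [item]))
      ([], [], [], []))

-- ===== PORT B =====
-- priority(x): the same elif chain as Source B
def pv_priority (x : String) : Int :=
  if PySem.Str.startswith x "+." then 0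
  else if PySem.Str.startswith x "*." then 1
  else if PySem.Str.startswith x "." then 2
  else 3

-- Python's lexicographic strict '<' on the key tuple (priority(a), a.count('.'), a), written out
def pv_keyLt (a b : String) : Bool :=
  decide (pv_priority a < pv_priority b) ||
    (pv_priority a == pv_priority b &&
      (decide (PySem.Str.count a "." < PySem.Str.count b ".") ||
        (PySem.Str.count a "." == PySem.Str.count b "." && decide (a < b))))

-- sorted(items, key=…) with a 3-tuple key: PySem's stable insertion sort shape
-- (PySem.List.sorted_eq_foldl_insertBy) with the tuple key's lexicographic '<' spelled out above
def sort_domain_items_alt (items : List String) : List String :=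
  items.foldl (fun acc x => PySem.List.insertBy pv_keyLt x acc) []

-- ===== PRECONDITION & SPEC =====
def Spec_sort_domain_items (items : List String) (out : List String) : Prop := out = sort_domain_items_alt items
instance (items : List String) (out : List String) : Decidable (Spec_sort_domain_items items out) := by unfold Spec_sort_domain_items; infer_instance

-- ===== CLAIM (what is proved, stated in full; the proofs are below) =====
def Claim_equal_sort_domain_items : Prop := ∀ (items : List String), Dom_sort_domain_items items → Spec_sort_domain_items items (sort_domain_items items)

-- ===== LEMMAS AND PROOFS =====

-- the comparator sorted2 (hence sort_by_parts) uses, named for the proofs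
def pv_b2 (a b : String) : Bool :=
  decide (PySem.Str.count a "." < PySem.Str.count b ".") ||
    (!decide (PySem.Str.count b "." < PySem.Str.count a ".") && decide (a < b))

theorem sort_by_parts_eq (xs : List String) :
    sort_by_parts xs = xs.foldl (fun acc x => PySem.List.insertBy pv_b2 x acc) [] := rfl

theorem keyLt_false {a b : String} (h : pv_priority b < pv_priority a) : pv_keyLt a b = false := by
  simp only [pv_keyLt, Bool.or_eq_false_iff, Bool.and_eq_false_iff, decide_eq_false_iff_not, beq_eq_false_iff_ne]
  constructor
  · omega
  · left; omega

theorem keyLt_true {a b : String} (h : pv_priority a < pv_priority b) : pv_keyLt a b = true := by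
  simp only [pv_keyLt, Bool.or_eq_true, decide_eq_true_iff]
  left; exact h

theorem keyLt_eq_b2 {a b : String} (h : pv_priority a = pv_priority b) : pv_keyLt a b = pv_b2 a b := by
  unfold pv_keyLt pv_b2
  rw [h]
  simp only [lt_self_iff_false, decide_false, beq_self_eq_true, Bool.false_or, Bool.true_and]
  generalize PySem.Str.count a "." = ca
  generalize PySem.Str.count b "." = cb
  rcases Nat.lt_trichotomy ca cb with hc | hc | hc
  · simp [hc]
  · subst hc; simp
  · simp [show ¬ ca < cb by omega, show ca ≠ cb by omega, hc]

theorem insertBy_skip (b : String → String → Bool) (x : String) (L R : List String)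
    (h : ∀ y ∈ L, b x y = false) :
    PySem.List.insertBy b x (L ++ R) = L ++ PySem.List.insertBy b x R := by
  induction L with
  | nil => rfl
  | cons y L ih =>
      have hy : b x y = false := h y (by simp)
      simp [PySem.List.insertBy, hy, ih (fun z hz => h z (by simp [hz]))]

theorem insertBy_stop (b : String → String → Bool) (x : String) (L R : List String)
    (hR : ∀ y ∈ R, b x y = true) :
    PySem.List.insertBy b x (L ++ R) = PySem.List.insertBy b x L ++ R := by
  induction L with
  | nil =>
      cases R with
      | nil => rfl
      | cons r rs => simp [PySem.List.insertBy, hR r (by simp)]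
  | cons y L ih =>
      cases hy : b x y with
      | true => simp [PySem.List.insertBy, hy]
      | false => simp [PySem.List.insertBy, hy, ih]

theorem insertBy_congr (b b' : String → String → Bool) (x : String) (L : List String)
    (h : ∀ y ∈ L, b x y = b' x y) :
    PySem.List.insertBy b x L = PySem.List.insertBy b' x L := by
  induction L with
  | nil => rfl
  | cons y L ih =>
      have hy : b x y = b' x y := h y (by simp)
      cases hy' : b' x y with
      | true => simp [PySem.List.insertBy, hy, hy']
      | false => simp [PySem.List.insertBy, hy, hy', ih (fun z hz => h z (by simp [hz]))]

theorem priority_cases (x : String) :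
    pv_priority x = 0 ∨ pv_priority x = 1 ∨ pv_priority x = 2 ∨ pv_priority x = 3 := by
  unfold pv_priority; split_ifs <;> simp

-- the bucket-filling loop of A computes the four priority filters
theorem bucketFold (items : List String) (a0 a1 a2 a3 : List String) :
    items.foldl
      (fun (st : List String × List String × List String × List String) item =>
        if PySem.Str.startswith item "+." then (st.1 ++ [item], st.2.1, st.2.2.1, st.2.2.2)
        else if PySem.Str.startswith item "*." then (st.1, st.2.1 ++ [item], st.2.2.1, st.2.2.2)
        else if PySem.Str.startswith item "." then (st.1, st.2.1, st.2.2.1 ++ [item], st.2.2.2)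
        else (st.1, st.2.1, st.2.2.1, st.2.2.2 ++ [item]))
      (a0, a1, a2, a3)
    = (a0 ++ items.filter (fun x => pv_priority x == 0),
       a1 ++ items.filter (fun x => pv_priority x == 1),
       a2 ++ items.filter (fun x => pv_priority x == 2),
       a3 ++ items.filter (fun x => pv_priority x == 3)) := by
  induction items generalizing a0 a1 a2 a3 with
  | nil => simp
  | cons x t ih =>
      simp only [List.foldl_cons, List.filter_cons]
      by_cases h0 : PySem.Str.startswith x "+." = true
      · have hp : pv_priority x = 0 := by unfold pv_priority; rw [if_pos h0]
        rw [if_pos h0, ih]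
        simp [hp, List.append_assoc]
      · by_cases h1 : PySem.Str.startswith x "*." = true
        · have hp : pv_priority x = 1 := by unfold pv_priority; rw [if_neg h0, if_pos h1]
          rw [if_neg h0, if_pos h1, ih]
          simp [hp, List.append_assoc]
        · by_cases h2 : PySem.Str.startswith x "." = true
          · have hp : pv_priority x = 2 := by unfold pv_priority; rw [if_neg h0, if_neg h1, if_pos h2]
            rw [if_neg h0, if_neg h1, if_pos h2, ih]
            simp [hp, List.append_assoc]
          · have hp : pv_priority x = 3 := by unfold pv_priority; rw [if_neg h0, if_neg h1, if_neg h2]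
            rw [if_neg h0, if_neg h1, if_neg h2, ih]
            simp [hp, List.append_assoc]

-- main invariant: B's single fold over everything = A's four per-bucket folds, concatenated
theorem splitFold (xs : List String) (L0 L1 L2 L3 : List String)
    (h0 : ∀ y ∈ L0, pv_priority y = 0) (h1 : ∀ y ∈ L1, pv_priority y = 1)
    (h2 : ∀ y ∈ L2, pv_priority y = 2) (h3 : ∀ y ∈ L3, pv_priority y = 3) :
    xs.foldl (fun acc x => PySem.List.insertBy pv_keyLt x acc) (L0 ++ (L1 ++ (L2 ++ L3)))
    = (xs.filter (fun x => pv_priority x == 0)).foldl (fun acc x => PySem.List.insertBy pv_b2 x acc) L0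
      ++ ((xs.filter (fun x => pv_priority x == 1)).foldl (fun acc x => PySem.List.insertBy pv_b2 x acc) L1
      ++ ((xs.filter (fun x => pv_priority x == 2)).foldl (fun acc x => PySem.List.insertBy pv_b2 x acc) L2
      ++ (xs.filter (fun x => pv_priority x == 3)).foldl (fun acc x => PySem.List.insertBy pv_b2 x acc) L3)) := by
  induction xs generalizing L0 L1 L2 L3 with
  | nil => simp
  | cons x t ih =>
      simp only [List.foldl_cons, List.filter_cons]
      rcases priority_cases x with hp | hp | hp | hp
      · have hstep : PySem.List.insertBy pv_keyLt x (L0 ++ (L1 ++ (L2 ++ L3)))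
            = PySem.List.insertBy pv_b2 x L0 ++ (L1 ++ (L2 ++ L3)) := by
          rw [insertBy_stop _ _ _ _ (by
            intro y hy
            apply keyLt_true
            rw [hp]
            simp only [List.mem_append] at hy
            rcases hy with hy | hy | hy
            · rw [h1 y hy]; norm_num
            · rw [h2 y hy]; norm_num
            · rw [h3 y hy]; norm_num)]
          rw [insertBy_congr _ pv_b2 _ _ (fun y hy => keyLt_eq_b2 (by rw [hp, h0 y hy]))]
        rw [hstep, ih (PySem.List.insertBy pv_b2 x L0) L1 L2 L3
              (fun y hy => by
                rcases (PySem.List.mem_insertBy _ _ _ _).1 hy with rfl | hy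
                · exact hp
                · exact h0 y hy) h1 h2 h3]
        simp [hp]
      · have hstep : PySem.List.insertBy pv_keyLt x (L0 ++ (L1 ++ (L2 ++ L3)))
            = L0 ++ (PySem.List.insertBy pv_b2 x L1 ++ (L2 ++ L3)) := by
          rw [insertBy_skip _ _ _ _ (fun y hy => keyLt_false (by rw [hp, h0 y hy]; norm_num))]
          rw [insertBy_stop _ _ _ _ (by
            intro y hy
            apply keyLt_true
            rw [hp]
            simp only [List.mem_append] at hy
            rcases hy with hy | hy
            · rw [h2 y hy]; norm_num
            · rw [h3 y hy]; norm_num)]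
          rw [insertBy_congr _ pv_b2 _ _ (fun y hy => keyLt_eq_b2 (by rw [hp, h1 y hy]))]
        rw [hstep, ih L0 (PySem.List.insertBy pv_b2 x L1) L2 L3 h0
              (fun y hy => by
                rcases (PySem.List.mem_insertBy _ _ _ _).1 hy with rfl | hy
                · exact hp
                · exact h1 y hy) h2 h3]
        simp [hp]
      · have hstep : PySem.List.insertBy pv_keyLt x (L0 ++ (L1 ++ (L2 ++ L3)))
            = L0 ++ (L1 ++ (PySem.List.insertBy pv_b2 x L2 ++ L3)) := by
          rw [insertBy_skip _ _ _ _ (fun y hy => keyLt_false (by rw [hp, h0 y hy]; norm_num))]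
          rw [insertBy_skip _ _ _ _ (fun y hy => keyLt_false (by rw [hp, h1 y hy]; norm_num))]
          rw [insertBy_stop _ _ _ _ (fun y hy => keyLt_true (by rw [hp, h3 y hy]; norm_num))]
          rw [insertBy_congr _ pv_b2 _ _ (fun y hy => keyLt_eq_b2 (by rw [hp, h2 y hy]))]
        rw [hstep, ih L0 L1 (PySem.List.insertBy pv_b2 x L2) L3 h0 h1
              (fun y hy => by
                rcases (PySem.List.mem_insertBy _ _ _ _).1 hy with rfl | hy
                · exact hp
                · exact h2 y hy) h3]
        simp [hp]
      · have hstep : PySem.List.insertBy pv_keyLt x (L0 ++ (L1 ++ (L2 ++ L3)))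
            = L0 ++ (L1 ++ (L2 ++ PySem.List.insertBy pv_b2 x L3)) := by
          rw [insertBy_skip _ _ _ _ (fun y hy => keyLt_false (by rw [hp, h0 y hy]; norm_num))]
          rw [insertBy_skip _ _ _ _ (fun y hy => keyLt_false (by rw [hp, h1 y hy]; norm_num))]
          rw [insertBy_skip _ _ _ _ (fun y hy => keyLt_false (by rw [hp, h2 y hy]; norm_num))]
          rw [insertBy_congr _ pv_b2 _ _ (fun y hy => keyLt_eq_b2 (by rw [hp, h3 y hy]))]
        rw [hstep, ih L0 L1 L2 (PySem.List.insertBy pv_b2 x L3) h0 h1 h2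
              (fun y hy => by
                rcases (PySem.List.mem_insertBy _ _ _ _).1 hy with rfl | hy
                · exact hp
                · exact h3 y hy)]
        simp [hp]

-- ===== VERDICT (by name: the statement is the Claim_ definition above) =====
theorem sort_domain_items_spec : Claim_equal_sort_domain_items := by
  intro items _
  unfold Spec_sort_domain_items sort_domain_items sort_domain_items_alt
  rw [bucketFold]
  have := splitFold items [] [] [] [] (by simp) (by simp) (by simp) (by simp)
  simp only [List.nil_append] at this
  rw [this]
  simp [sort_by_parts_eq, List.append_assoc]
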